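-- pv_equiv track=rewrite | github.com/AI-Gio/StructuredProgramming | Formatieve_opdr1.py | Zero_One
-- ===== SOURCE A (Python) =====
-- def count(lijst, X):
--     tel = 0
--     for i in lijst:
--         if i == X:
--             tel += 1
--     return tel
--
-- def Zero_One(lijst):
--     for i in lijst:
--         if i != 0 and i != 1:
--             return "Sorry there has to be an input of 1 or 0"
--     ManyOne = count(lijst, 1)
--     ManyZero = count(lijst, 0)
--     if ManyZero >= 12:
--         return "Sorry there are too many zero's in this list"
--     elif ManyZero > ManyOne:
--         return "Sorry there are more zero's then one's in this list"
--     else: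
--         return "This list is verified"
-- ===== SOURCE B (Python) =====
-- def Zero_One(lijst):
--     zeros = 0
--     ones = 0
--     for i in lijst:
--         if i != 0 and i != 1:
--             return "Sorry there has to be an input of 1 or 0"
--         if i == 1:
--             ones += 1
--         else:
--             zeros += 1
--     if zeros >= 12:
--         return "Sorry there are too many zero's in this list"
--     elif zeros > ones:
--         return "Sorry there are more zero's then one's in this list"
--     else:
--         return "This list is verified"
-- ===== Notes on version B (the rewrite author's own statement) =====
-- stated objective: simpler
-- what changed: B replaces A's three scans (a validation loop plus two calls to a count helper) with one early-exit pass that validates and accumulates the zero/one counters inline.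
import Mathlib
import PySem

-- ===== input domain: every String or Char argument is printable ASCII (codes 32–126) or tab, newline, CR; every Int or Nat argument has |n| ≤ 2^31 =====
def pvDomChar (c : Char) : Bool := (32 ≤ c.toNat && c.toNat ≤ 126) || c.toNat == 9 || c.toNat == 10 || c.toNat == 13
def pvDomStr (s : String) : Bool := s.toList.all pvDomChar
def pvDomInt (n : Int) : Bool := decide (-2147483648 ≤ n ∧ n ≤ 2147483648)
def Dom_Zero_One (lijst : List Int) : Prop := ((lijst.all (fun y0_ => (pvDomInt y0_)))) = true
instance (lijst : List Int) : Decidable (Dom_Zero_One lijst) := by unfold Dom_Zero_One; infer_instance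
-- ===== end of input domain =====

-- B: one early-exit pass with inline zero/one counters instead of A's validation loop plus two count scans (return value only).
-- ===== PORT A =====
def pvCount (lijst : List Int) (X : Int) : Int :=
  lijst.foldl (fun tel i => if i == X then tel + 1 else tel) 0

def pvValidate : List Int → Option String
  | [] => none
  | i :: rest =>
    if i ≠ 0 ∧ i ≠ 1 then some "Sorry there has to be an input of 1 or 0"
    else pvValidate rest

def Zero_One (lijst : List Int) : String :=
  match pvValidate lijst with
  | some s => s
  | none =>
    let ManyOne := pvCount lijst 1
    let ManyZero := pvCount lijst 0
    if ManyZero ≥ 12 then "Sorry there are too many zero's in this list"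
    else if ManyZero > ManyOne then "Sorry there are more zero's then one's in this list"
    else "This list is verified"

-- ===== PORT B =====
def pvAltLoop : List Int → Int → Int → String
  | [], zeros, ones =>
    if zeros ≥ 12 then "Sorry there are too many zero's in this list"
    else if zeros > ones then "Sorry there are more zero's then one's in this list"
    else "This list is verified"
  | i :: rest, zeros, ones =>
    if i ≠ 0 ∧ i ≠ 1 then "Sorry there has to be an input of 1 or 0"
    else if i == 1 then pvAltLoop rest zeros (ones + 1)
    else pvAltLoop rest (zeros + 1) ones

def Zero_One_alt (lijst : List Int) : String :=
  pvAltLoop lijst 0 0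

-- ===== PRECONDITION & SPEC =====
def Spec_Zero_One (lijst : List Int) (out : String) : Prop := out = Zero_One_alt lijst
instance (lijst : List Int) (out : String) : Decidable (Spec_Zero_One lijst out) := by unfold Spec_Zero_One; infer_instance

-- ===== CLAIM (what is proved, stated in full; the proofs are below) =====
def Claim_equal_Zero_One : Prop := ∀ (lijst : List Int), Dom_Zero_One lijst → Spec_Zero_One lijst (Zero_One lijst)

-- ===== LEMMAS AND PROOFS =====

-- ===== VERDICT (by name: the statement is the Claim_ definition above) =====
lemma pvCount_shift (l : List Int) (X t : Int) :
    l.foldl (fun tel i => if i == X then tel + 1 else tel) t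
      = t + l.foldl (fun tel i => if i == X then tel + 1 else tel) 0 := by
  induction l generalizing t with
  | nil => simp
  | cons i rest ih =>
    simp only [List.foldl]
    rw [ih, ih (if i == X then (0:Int) + 1 else 0)]
    split <;> ring

lemma pvMain (l : List Int) (z o : Int) :
    pvAltLoop l z o =
      match pvValidate l with
      | some s => s
      | none =>
        if z + pvCount l 0 ≥ 12 then "Sorry there are too many zero's in this list"
        else if z + pvCount l 0 > o + pvCount l 1 then "Sorry there are more zero's then one's in this list"
        else "This list is verified" := by
  induction l generalizing z o with
  | nil => simp [pvAltLoop, pvValidate, pvCount]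
  | cons i rest ih =>
    by_cases hbad : i ≠ 0 ∧ i ≠ 1
    · simp [pvAltLoop, pvValidate, hbad]
    · have hcnt : ∀ X : Int, pvCount (i :: rest) X
          = (if i == X then (1:Int) else 0) + pvCount rest X := by
        intro X
        simp only [pvCount, List.foldl]
        rw [pvCount_shift]
        split <;> simp
      by_cases h1 : i = 1
      · simp only [pvAltLoop, pvValidate, hbad, ih]
        subst h1
        simp [hcnt]
        split_ifs <;> first | rfl | omega
      · have h0 : i = 0 := by tauto
        subst h0
        simp only [pvAltLoop, pvValidate, hbad, ih]
        simp [hcnt]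
        split_ifs <;> first | rfl | omega

theorem Zero_One_spec : Claim_equal_Zero_One := by
  intro lijst _
  unfold Spec_Zero_One Zero_One Zero_One_alt
  rw [pvMain]
  cases pvValidate lijst <;> simp
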